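-- pv_equiv track=rewrite | github.com/CaptainKryga/Computor-v1 | algoritm.py | check_structure_x
-- ===== SOURCE A (Python) =====
-- def check_structure_x(list):
-- 	# проверка количества элементов с правой стороны от равно и слевой
-- 	l1 = []
-- 	l2 = []
-- 	equals = False
-- 	for l in list:
-- 		if l[0] == '=':
-- 			if not equals:
-- 				equals = True
-- 				continue
-- 			else:
-- 				return 'missing \'=\''
--
-- 		if equals:
-- 			l2.append(l)
-- 		else:
-- 			l1.append(l)
--
-- 	if not equals or len(l1) <= 0 or len(l2) <= 0:
-- 		return 'wrong equation'
--
-- 	# если х без коофициента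
-- 	for l in list:
-- 		for s in l:
-- 			if s[0] == 'x' and len(l) <= 2:
-- 				return 'missing coefficient'
-- 	return 'true'
-- ===== SOURCE B (Python) =====
-- def check_structure_x(list):
--     # Compress each line to a one-character code ('=' for an equals marker, '.' otherwise),
--     # then decide the structure purely on that signature string via partition.
--     sig = ''.join('=' if l[:1] == ['='] else '.' for l in list)
--     left, eq, right = sig.partition('=')
--     if '=' in right:
--         return 'missing \'=\''
--     if not left or not eq or not right:
--         return 'wrong equation'
--     if any(len(l) <= 2 and any(s.startswith('x') for s in l) for l in list):
--         return 'missing coefficient'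
--     return 'true'
-- ===== Notes on version B (the rewrite author's own statement) =====
-- stated objective: alternative
-- what changed: A's single stateful pass with an equals flag and two accumulator lists is replaced by compressing each line to a one-character code ('=' marker / '.' other) and judging that signature string with str.partition ('=' in the right part = duplicate marker, empty left/middle/right part = wrong equation), with the coefficient scan as one declarative any-expression.
import Mathlib
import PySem

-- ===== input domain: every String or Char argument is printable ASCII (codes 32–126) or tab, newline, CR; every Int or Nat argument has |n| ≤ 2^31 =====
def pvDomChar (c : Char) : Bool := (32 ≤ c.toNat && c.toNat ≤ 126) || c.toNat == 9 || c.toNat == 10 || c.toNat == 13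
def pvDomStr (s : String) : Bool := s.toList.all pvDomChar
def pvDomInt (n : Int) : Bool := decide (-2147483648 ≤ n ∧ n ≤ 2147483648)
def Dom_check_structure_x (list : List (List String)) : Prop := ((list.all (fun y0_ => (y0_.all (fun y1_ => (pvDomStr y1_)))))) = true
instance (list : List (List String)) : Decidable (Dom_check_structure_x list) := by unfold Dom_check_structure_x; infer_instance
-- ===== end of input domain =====

-- B replaces A's stateful flag/accumulator pass by compressing each line to a one-character code and judging the resulting signature string with partition; the coefficient scan becomes one any-expression (objective: alternative decomposition, same cost).


-- ===== PORT A =====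
-- inner 'for s in l' of A's second loop: true iff some s has s[0]=='x' and len(l)<=2
def csxInner (llen : Nat) : List String → Bool
  | [] => false
  | s :: rest => (PySem.Str.pyGet? s 0 == some 'x' && decide (llen ≤ 2)) || csxInner llen rest

-- A's second loop 'for l in list'
def csxCoeff : List (List String) → String
  | [] => "true"
  | l :: rest => if csxInner l.length l then "missing coefficient" else csxCoeff rest

-- A's first loop: state l1, l2, equals; early return on the second '='
def csxLoop (orig : List (List String)) :
    List (List String) → List (List String) → List (List String) → Bool → String
  | [], l1, l2, equals =>
      if !equals || l1.length ≤ 0 || l2.length ≤ 0 then "wrong equation" else csxCoeff orig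
  | l :: rest, l1, l2, equals =>
      if PySem.List.pyGet? l 0 == some "=" then
        if !equals then csxLoop orig rest l1 l2 true else "missing '='"
      else if equals then csxLoop orig rest l1 (l2 ++ [l]) equals
      else csxLoop orig rest (l1 ++ [l]) l2 equals

def check_structure_x (list : List (List String)) : String :=
  csxLoop list list [] [] false

-- ===== PORT B =====
def check_structure_x_alt (list : List (List String)) : String :=
  -- sig = ''.join('=' if l[:1] == ['='] else '.' for l in list); kept as the char list (PySem string facts live on .toList)
  let sig : List Char := list.map (fun l => if PySem.List.slice l none (some 1) == ["="] then '=' else '.')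
  -- left, eq, right = sig.partition('='): str.partition ported by hand, exact (split at the FIRST occurrence of '=')
  let i := PySem.Chars.find sig ['=']
  let left : List Char := if i < 0 then sig else sig.take i.toNat
  let eq : List Char := if i < 0 then [] else ['=']
  let right : List Char := if i < 0 then [] else sig.drop (i.toNat + 1)
  if PySem.Chars.isIn ['='] right then "missing '='"
  else if left.isEmpty || eq.isEmpty || right.isEmpty then "wrong equation"
  else if list.any (fun l => decide (l.length ≤ 2) && l.any (fun s => PySem.Str.startswith s "x")) then
    "missing coefficient"
  else "true"

-- ===== PRECONDITION & SPEC =====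
-- Pre_ excludes exactly the inputs on which Python A raises IndexError (l[0] on an empty line not
-- preceded by a second '='-marker, or — once the coefficient scan is reached — s[0] on an empty
-- token not preceded by a token triggering 'missing coefficient'); A returns on every other input.
def Pre_check_structure_x (list : List (List String)) : Prop :=
  (((List.range list.length).all (fun i =>
        !((list.getD i []).length == 0)
          || decide (2 ≤ (list.take i).countP (fun l => l.headD "" == "="))))
    && (!(list.countP (fun l => l.headD "" == "=") == 1
          && (list.findIdx (fun l => l.headD "" == "=") != 0)
          && (list.findIdx (fun l => l.headD "" == "=") + 1 != list.length))
        || (match (list.flatMap (fun l => l.map (fun s =>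
              (s == "", decide (l.length ≤ 2) && PySem.Str.startswith s "x")))).find?
              (fun p => p.1 || p.2) with
            | some p => !p.1
            | none => true))) = true
instance (list : List (List String)) : Decidable (Pre_check_structure_x list) := by
  unfold Pre_check_structure_x; infer_instance

def pvWitness_check_structure_x : List (List String) := [["2x"], ["="], ["3"]]

def Spec_check_structure_x (list : List (List String)) (out : String) : Prop := out = check_structure_x_alt list
instance (list : List (List String)) (out : String) : Decidable (Spec_check_structure_x list out) := by unfold Spec_check_structure_x; infer_instance

-- ===== CLAIM (what is proved, stated in full; the proofs are below) =====
def Claim_equal_check_structure_x : Prop := ∀ (list : List (List String)), Dom_check_structure_x list → Pre_check_structure_x list → Spec_check_structure_x list (check_structure_x list)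

-- ===== LEMMAS AND PROOFS =====

def isMk (l : List String) : Bool := PySem.List.pyGet? l 0 == some "="

lemma csxInner_any (n : Nat) (l : List String) :
    csxInner n l = l.any (fun s => PySem.Str.pyGet? s 0 == some 'x' && decide (n ≤ 2)) := by
  induction l with
  | nil => rfl
  | cons s rest ih => simp [csxInner, ih]

lemma csxCoeff_any (xs : List (List String)) :
    csxCoeff xs = if xs.any (fun l => l.any
        (fun s => PySem.Str.pyGet? s 0 == some 'x' && decide (l.length ≤ 2)))
      then "missing coefficient" else "true" := by
  induction xs with
  | nil => rfl
  | cons l rest ih =>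
      rw [csxCoeff, csxInner_any, ih, List.any_cons]
      cases h : l.any (fun s => PySem.Str.pyGet? s 0 == some 'x' && decide (l.length ≤ 2)) <;> simp

lemma csxLoop_true (orig : List (List String)) :
    ∀ (rem l1 l2 : List (List String)), csxLoop orig rem l1 l2 true =
      if rem.any isMk then "missing '='"
      else if l1.length = 0 ∨ l2.length + rem.length = 0 then "wrong equation"
      else csxCoeff orig := by
  intro rem
  induction rem with
  | nil =>
      intro l1 l2
      simp only [csxLoop, List.any_nil, Bool.not_true, Bool.false_or, List.length_nil,
        Nat.add_zero, Bool.false_eq_true, if_false, Bool.or_eq_true, decide_eq_true_eq,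
        Nat.le_zero]
      rfl
  | cons l rest ih =>
      intro l1 l2
      cases h : isMk l with
      | true =>
          have h2 : (PySem.List.pyGet? l 0 == some "=") = true := h
          simp [csxLoop, h2, List.any_cons, h]
      | false =>
          have h' : ¬ ((PySem.List.pyGet? l 0 == some "=") = true) := by
            intro hh
            rw [show (PySem.List.pyGet? l 0 == some "=") = isMk l from rfl, h] at hh
            cases hh
          simp only [csxLoop, if_neg h', if_true, ih,
            List.any_cons, List.length_append, List.length_cons, List.length_nil, h,
            Bool.false_or]
          cases ha : rest.any isMk with
          | true => simp
          | false =>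
              simp only [Bool.false_eq_true, if_false]
              split_ifs with hA hB hC
              · rfl
              · rcases hA with h1 | h1
                · exact absurd (Or.inl h1) hB
                · exact absurd h1 (by omega)
              · rcases hC with h1 | h1
                · exact absurd (Or.inl h1) hA
                · exact h1.elim
              · rfl

lemma csxLoop_false (orig : List (List String)) :
    ∀ (rem l1 : List (List String)), csxLoop orig rem l1 [] false =
      if rem.countP isMk = 0 then "wrong equation"
      else if 1 < rem.countP isMk then "missing '='"
      else if l1.length + rem.findIdx isMk = 0 ∨ rem.length = rem.findIdx isMk + 1
        then "wrong equation" else csxCoeff orig := by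
  intro rem
  induction rem with
  | nil => intro l1; simp [csxLoop]
  | cons l rest ih =>
      intro l1
      cases h : isMk l with
      | true =>
          have h2 : (PySem.List.pyGet? l 0 == some "=") = true := h
          simp only [csxLoop, h2, if_true, Bool.not_false, csxLoop_true]
          rw [List.countP_cons_of_pos (p := isMk) h, List.findIdx_cons, h]
          simp only [cond_true, List.length_nil, Nat.zero_add, Nat.add_zero, List.length_cons]
          by_cases hc : rest.countP isMk = 0
          · have ha : rest.any isMk = false := by
              rw [List.any_eq_false]; intro x hx
              have := List.countP_eq_zero.mp hc x hx; simpa using this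
            rw [ha]
            simp only [Bool.false_eq_true, if_false]
            rw [if_neg (show ¬ (rest.countP isMk + 1 = 0) by omega),
                if_neg (show ¬ (1 < rest.countP isMk + 1) by omega)]
            split_ifs <;> first | rfl | (exfalso; omega)
          · have ha : rest.any isMk = true := by
              rcases List.countP_pos_iff.mp (Nat.pos_of_ne_zero hc) with ⟨x, hx, hpx⟩
              exact List.any_eq_true.mpr ⟨x, hx, hpx⟩
            rw [ha]
            simp only [if_true]
            rw [if_neg (show ¬ (rest.countP isMk + 1 = 0) by omega),
                if_pos (show 1 < rest.countP isMk + 1 by omega)]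
      | false =>
          have h' : ¬ ((PySem.List.pyGet? l 0 == some "=") = true) := by
            intro hh
            rw [show (PySem.List.pyGet? l 0 == some "=") = isMk l from rfl, h] at hh
            cases hh
          simp only [csxLoop, if_neg h', Bool.false_eq_true, if_false, ih]
          rw [List.countP_cons_of_neg (p := isMk) (by simp [h]), List.findIdx_cons, h]
          simp only [cond_false, List.length_append, List.length_cons, List.length_nil,
            Nat.zero_add]
          by_cases hc0 : rest.countP isMk = 0
          · rw [if_pos hc0, if_pos hc0]
          · rw [if_neg hc0, if_neg hc0]
            by_cases hc1 : 1 < rest.countP isMk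
            · rw [if_pos hc1, if_pos hc1]
            · rw [if_neg hc1, if_neg hc1]
              split_ifs with hA hB hC
              · rfl
              · rcases hA with h1 | h1
                · exact absurd h1 (by omega)
                · exact absurd (Or.inr (show rest.length + 1
                    = List.findIdx isMk rest + 1 + 1 by omega)) hB
              · rcases hC with h1 | h1
                · exact h1.elim
                · exact absurd (Or.inr (show rest.length
                    = List.findIdx isMk rest + 1 by omega)) hA
              · rfl

-- B's per-line code test equals A's marker test
lemma code_eq_isMk (l : List String) :
    (PySem.List.slice l none (some 1) == ["="]) = isMk l := by
  have h1 : PySem.List.slice l none (some 1) = l.take 1 := by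
    exact_mod_cast PySem.List.slice_to_natCast l 1
  rw [h1]
  cases l with
  | nil => decide
  | cons a t =>
      simp only [List.take_succ_cons, List.take_zero, isMk, PySem.List.pyGet?,
        PySem.List.pyIdx?]
      norm_num

-- prefix of a drop at a single char is an indexed lookup
lemma singleton_prefix_iff_getElem? (a : Char) (l : List Char) (i : Nat) :
    [a] <+: l.drop i ↔ l[i]? = some a := by
  rw [show l[i]? = (l.drop i)[0]? by simp]
  generalize l.drop i = d
  constructor
  · rintro ⟨t, ht⟩; rw [← ht]; simp
  · intro h
    cases d with
    | nil => simp at h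
    | cons b t =>
        simp only [List.getElem?_cons_zero, Option.some.injEq] at h
        subst h
        exact ⟨t, rfl⟩

-- str.find of a single character is findIdx (or -1)
lemma find_single (cs : List Char) (ch : Char) :
    PySem.Chars.find cs [ch] =
      if ch ∈ cs then (cs.findIdx (· == ch) : Int) else -1 := by
  by_cases hm : ch ∈ cs
  · rw [if_pos hm]
    have hnn : 0 ≤ PySem.Chars.find cs [ch] := by
      rw [PySem.Chars.find_nonneg_iff, List.singleton_infix_iff]; exact hm
    obtain ⟨hpre, hmin⟩ := PySem.Chars.find_spec hnn
    set t := (PySem.Chars.find cs [ch]).toNat with ht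
    rw [singleton_prefix_iff_getElem?] at hpre
    have htlen : t < cs.length := by
      by_contra hge
      rw [List.getElem?_eq_none (by omega)] at hpre
      cases hpre
    have hfi : cs.findIdx (· == ch) = t := by
      rcases Nat.lt_trichotomy (cs.findIdx (· == ch)) t with hlt | heq | hgt
      · exfalso
        have hflen : cs.findIdx (· == ch) < cs.length := by omega
        have hget := List.findIdx_getElem (w := hflen)
        have hp := hmin _ hlt
        rw [singleton_prefix_iff_getElem?] at hp
        exact hp (by rw [List.getElem?_eq_getElem hflen]; simpa using hget)
      · exact heq
      · exfalso
        have hfalse := List.not_of_lt_findIdx (p := (· == ch)) hgt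
        rw [List.getElem?_eq_getElem htlen, Option.some.injEq] at hpre
        exact absurd hpre (by simpa using hfalse)
    omega
  · rw [if_neg hm, PySem.Chars.find_eq_neg_one_iff, List.singleton_infix_iff]
    exact hm

lemma mem_map_code (list : List (List String)) :
    '=' ∈ list.map (fun l => if isMk l then '=' else '.') ↔ 0 < list.countP isMk := by
  rw [List.mem_map, List.countP_pos_iff]
  constructor
  · rintro ⟨l, hl, hc⟩
    refine ⟨l, hl, ?_⟩
    by_contra hn
    rw [if_neg (by simpa using hn)] at hc
    cases hc
  · rintro ⟨l, hl, hc⟩; exact ⟨l, hl, by rw [if_pos hc]⟩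

lemma findIdx_map_code (list : List (List String)) :
    (list.map (fun l => if isMk l then '=' else '.')).findIdx (· == '=') = list.findIdx isMk := by
  rw [List.findIdx_map]
  congr 1
  funext l
  cases h : isMk l <;> simp [h]

lemma countP_map_code (list : List (List String)) :
    (list.map (fun l => if isMk l then '=' else '.')).countP (· == '=') = list.countP isMk := by
  rw [List.countP_map]
  congr 1
  funext l
  cases h : isMk l <;> simp [h]

-- one marker and none after position k ⟺ exactly one marker in total
lemma mem_drop_iff_two_le (cs : List Char) (k : Nat) (hk : cs.findIdx (· == '=') = k)
    (hlt : k < cs.length) :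
    '=' ∈ cs.drop (k + 1) ↔ 2 ≤ cs.countP (· == '=') := by
  have hsplit : cs = cs.take k ++ cs[k] :: cs.drop (k + 1) := by
    rw [← List.drop_eq_getElem_cons hlt, List.take_append_drop]
  have hck : cs[k] = '=' := by
    have := List.findIdx_getElem (w := hk ▸ hlt) (p := (· == '=')) (xs := cs)
    simpa [hk] using this
  have htake : (cs.take k).countP (· == '=') = 0 := by
    rw [List.countP_eq_zero]
    intro a ha
    rw [List.mem_take_iff_getElem] at ha
    obtain ⟨i, hi, rfl⟩ := ha
    have := List.not_of_lt_findIdx (p := (· == '=')) (xs := cs) (i := i) (by omega)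
    simpa using this
  constructor
  · intro hmem
    conv_rhs => rw [hsplit]
    rw [List.countP_append, htake, List.countP_cons_of_pos (p := (· == '=')) (by simp [hck])]
    have : 0 < (cs.drop (k + 1)).countP (· == '=') :=
      List.countP_pos_iff.mpr ⟨'=', hmem, by simp⟩
    omega
  · intro h2
    have hcnt : cs.countP (· == '=') =
        (cs.drop (k + 1)).countP (· == '=') + 1 := by
      conv_lhs => rw [hsplit]
      rw [List.countP_append, htake, List.countP_cons_of_pos (p := (· == '=')) (by simp [hck])]
      omega
    have : 0 < (cs.drop (k + 1)).countP (· == '=') := by omega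
    obtain ⟨a, ha, hpa⟩ := List.countP_pos_iff.mp this
    rwa [show a = '=' by simpa using hpa] at ha

-- B's per-token test equals A's (as evaluated by the total port)
lemma token_test_eq (cs : List Char) :
    (PySem.List.pyGet? cs 0 == some 'x') = PySem.Chars.startswith cs ['x'] := by
  cases cs with
  | nil => decide
  | cons a t =>
      rw [Bool.eq_iff_iff, PySem.Chars.startswith_iff, List.cons_prefix_cons]
      simp only [PySem.List.pyGet?, PySem.List.pyIdx?]
      norm_num
      exact eq_comm

lemma coeff_any_eq (list : List (List String)) :
    list.any (fun l => l.any (fun s => PySem.Str.pyGet? s 0 == some 'x' && decide (l.length ≤ 2)))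
      = list.any (fun l => decide (l.length ≤ 2) && l.any (fun s => PySem.Str.startswith s "x")) := by
  congr 1
  funext l
  cases hl : decide (l.length ≤ 2) with
  | false => simp
  | true =>
      simp only [Bool.and_true, Bool.true_and]
      congr 1
      funext s
      rw [show PySem.Str.pyGet? s 0 = PySem.List.pyGet? s.toList 0 from by simp,
          show PySem.Str.startswith s "x" = PySem.Chars.startswith s.toList ['x'] from by simp,
          token_test_eq]
-- ===== VERDICT (by name: the statement is the Claim_ definition above) =====
theorem check_structure_x_spec : Claim_equal_check_structure_x := by
  intro list _ _
  unfold Spec_check_structure_x check_structure_x check_structure_x_alt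
  rw [csxLoop_false]
  have hfun : (fun l : List String => if PySem.List.slice l none (some 1) == ["="] then '=' else '.')
      = (fun l => if isMk l then '=' else '.') := by
    funext l; rw [code_eq_isMk]
  simp only [hfun, List.length_nil, Nat.zero_add]
  set cs := list.map (fun l => if isMk l then '=' else '.') with hcs
  have hcslen : cs.length = list.length := by rw [hcs, List.length_map]
  rw [find_single]
  by_cases hm : 0 < list.countP isMk
  case neg =>
    have hc0 : list.countP isMk = 0 := by omega
    have hnm : '=' ∉ cs := by rw [hcs, mem_map_code]; omega
    rw [if_neg hnm]
    simp only [if_pos (show (-1 : Int) < 0 by norm_num)]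
    rw [if_pos hc0,
        show PySem.Chars.isIn ['='] ([] : List Char) = false from by decide]
    simp
  case pos =>
    have hnz : ¬ list.countP isMk = 0 := by omega
    rw [if_neg hnz]
    have hmem : '=' ∈ cs := by rw [hcs, mem_map_code]; exact hm
    set k := list.findIdx isMk with hk
    have hfix : cs.findIdx (· == '=') = k := by rw [hcs, findIdx_map_code]
    have hklen : k < list.length := by
      rw [hk]
      apply List.findIdx_lt_length.mpr
      obtain ⟨l, hl, hpl⟩ := List.countP_pos_iff.mp hm
      exact ⟨l, hl, hpl⟩
    rw [if_pos hmem, hfix]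
    simp only [if_neg (show ¬ ((k : Int) < 0) by omega), Int.toNat_natCast]
    have hcnt : cs.countP (· == '=') = list.countP isMk := by rw [hcs, countP_map_code]
    have hdrop : '=' ∈ cs.drop (k + 1) ↔ 2 ≤ list.countP isMk := by
      rw [mem_drop_iff_two_le cs k hfix (by omega), hcnt]
    have hinfix : PySem.Chars.isIn ['='] (cs.drop (k + 1)) = decide ('=' ∈ cs.drop (k + 1)) := by
      cases hd : decide ('=' ∈ cs.drop (k + 1)) with
      | true =>
          rw [PySem.Chars.isIn_iff_infix, List.singleton_infix_iff]
          exact of_decide_eq_true hd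
      | false =>
          rw [PySem.Chars.isIn_eq_false_iff, List.singleton_infix_iff]
          exact of_decide_eq_false hd
    by_cases h2 : 1 < list.countP isMk
    case pos =>
      rw [if_pos h2]
      rw [show PySem.Chars.isIn ['='] (cs.drop (k + 1)) = true by
        rw [hinfix, decide_eq_true_iff]; exact hdrop.mpr (by omega)]
      simp
    case neg =>
      rw [if_neg h2]
      rw [show PySem.Chars.isIn ['='] (cs.drop (k + 1)) = false by
        rw [hinfix, decide_eq_false_iff_not]
        intro hx
        exact h2 (by have := hdrop.mp hx; omega)]
      simp only [Bool.false_eq_true, if_false]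
      have hleft : (cs.take k).isEmpty = decide (k = 0) := by
        cases hz : decide (k = 0) with
        | true =>
            have : k = 0 := of_decide_eq_true hz
            simp [this]
        | false =>
            have hkz : k ≠ 0 := of_decide_eq_false hz
            rw [List.isEmpty_eq_false_iff, ← List.length_pos_iff, List.length_take]
            omega
      have hright : (cs.drop (k + 1)).isEmpty = decide (list.length = k + 1) := by
        cases hz : decide (list.length = k + 1) with
        | true =>
            have h := of_decide_eq_true hz
            have hlen0 : (cs.drop (k + 1)).length = 0 := by rw [List.length_drop]; omega
            rw [List.length_eq_zero_iff] at hlen0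
            simp [hlen0]
        | false =>
            have h := of_decide_eq_false hz
            rw [List.isEmpty_eq_false_iff, ← List.length_pos_iff, List.length_drop]
            omega
      by_cases hwe : k = 0 ∨ list.length = k + 1
      case pos =>
        rw [if_pos hwe]
        rcases hwe with h | h
        · rw [hleft]
          simp [h]
        · rw [hleft, hright]
          simp [h]
      case neg =>
        push Not at hwe
        rw [if_neg (show ¬ (k = 0 ∨ list.length = k + 1) by omega)]
        rw [hleft, hright]
        rw [show decide (k = 0) = false from decide_eq_false hwe.1,
            show decide (list.length = k + 1) = false from decide_eq_false hwe.2]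
        simp only [List.isEmpty_cons, Bool.or_false, Bool.false_eq_true, if_false]
        rw [csxCoeff_any, coeff_any_eq]
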